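-- pv_equiv track=rewrite | github.com/nuryyevva/emotion_tracker | app/utils/trends.py | detect_consecutive_threshold
-- ===== SOURCE A (Python) =====
-- from typing import Any, List, Dict
--
-- def detect_consecutive_threshold(
--         records: List[Dict[str, Any]],
--         metric_name: str,
--         threshold: int,
--         consecutive_days: int
-- ) -> bool:
--     """
--     Обнаруживает последовательные дни, где метрика превышает порог
--
--     Args:
--         records: Список записей с данными
--         metric_name: Название метрики для проверки
--         threshold: Пороговое значение
--         consecutive_days: Количество последовательных дней
--
--     Returns:
--         bool: True если найдено последовательных дней больше или равно consecutive_days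
--     """
--     if not records or len(records) < consecutive_days:
--         return False
--
--     consecutive_count = 0
--
--     for record in records:
--         metric_value = record.get(metric_name, 0)
--
--         if metric_value >= threshold:
--             consecutive_count += 1
--             if consecutive_count >= consecutive_days:
--                 return True
--         else:
--             consecutive_count = 0
--
--     return False
-- ===== SOURCE B (Python) =====
-- from typing import Any, List, Dict
--
-- def detect_consecutive_threshold(
--         records: List[Dict[str, Any]],
--         metric_name: str,
--         threshold: int,
--         consecutive_days: int
-- ) -> bool:
--     """Sliding-window re-implementation: precompute which records qualify,
--     then check every window of max(consecutive_days, 1) records with any/all."""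
--     if not records or len(records) < consecutive_days:
--         return False
--     over = [record.get(metric_name, 0) >= threshold for record in records]
--     window = max(consecutive_days, 1)
--     return any(all(over[i:i + window]) for i in range(len(over) - window + 1))
-- ===== Notes on version B (the rewrite author's own statement) =====
-- stated objective: alternative
-- what changed: Replaces A's single-pass incremental counter with early exit by first precomputing the boolean list of qualifying records and then a declarative sliding-window check: any(all(over[i:i+window])) over every window of max(consecutive_days, 1) records.
import Mathlib
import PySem

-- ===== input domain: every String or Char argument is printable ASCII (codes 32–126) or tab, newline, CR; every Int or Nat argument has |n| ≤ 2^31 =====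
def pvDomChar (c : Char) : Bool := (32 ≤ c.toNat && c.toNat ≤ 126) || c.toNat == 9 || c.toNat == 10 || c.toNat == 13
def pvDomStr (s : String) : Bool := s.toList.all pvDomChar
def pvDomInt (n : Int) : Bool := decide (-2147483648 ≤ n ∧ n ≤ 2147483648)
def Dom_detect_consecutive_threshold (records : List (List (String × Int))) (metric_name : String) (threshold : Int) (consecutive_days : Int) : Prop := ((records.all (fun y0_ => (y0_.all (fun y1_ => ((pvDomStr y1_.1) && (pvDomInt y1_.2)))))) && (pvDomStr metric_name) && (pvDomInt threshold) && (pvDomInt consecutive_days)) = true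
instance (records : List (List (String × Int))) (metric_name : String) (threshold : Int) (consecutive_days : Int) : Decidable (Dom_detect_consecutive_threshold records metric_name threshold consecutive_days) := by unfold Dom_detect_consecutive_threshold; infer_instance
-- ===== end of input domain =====

-- B replaces A's incremental counter with a precomputed qualifying-record list and a
-- brute-force sliding-window any/all check (alternative decomposition, not faster).

-- ===== PORT A =====
-- the for-loop of A, with the running consecutive_count as the extra argument
def pvScanA (metric_name : String) (threshold consecutive_days : Int) :
    List (List (String × Int)) → Int → Bool
  | [], _ => false
  | record :: rest, consecutive_count =>
      if (PySem.Dict.mk record).getD metric_name 0 ≥ threshold then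
        if consecutive_count + 1 ≥ consecutive_days then true
        else pvScanA metric_name threshold consecutive_days rest (consecutive_count + 1)
      else pvScanA metric_name threshold consecutive_days rest 0

def detect_consecutive_threshold (records : List (List (String × Int))) (metric_name : String) (threshold : Int) (consecutive_days : Int) : Bool :=
  if records = [] ∨ (records.length : Int) < consecutive_days then false
  else pvScanA metric_name threshold consecutive_days records 0

-- ===== PORT B =====
def detect_consecutive_threshold_alt (records : List (List (String × Int))) (metric_name : String) (threshold : Int) (consecutive_days : Int) : Bool :=
  if records = [] ∨ (records.length : Int) < consecutive_days then false
  else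
    let overL := records.map (fun record => decide ((PySem.Dict.mk record).getD metric_name 0 ≥ threshold))
    let window := max consecutive_days 1
    (PySem.List.pyRange 0 ((overL.length : Int) - window + 1) 1).any
      (fun i => (PySem.List.slice overL (some i) (some (i + window))).all (fun b => b))

-- ===== PRECONDITION & SPEC =====
def Spec_detect_consecutive_threshold (records : List (List (String × Int))) (metric_name : String) (threshold : Int) (consecutive_days : Int) (out : Bool) : Prop := out = detect_consecutive_threshold_alt records metric_name threshold consecutive_days
instance (records : List (List (String × Int))) (metric_name : String) (threshold : Int) (consecutive_days : Int) (out : Bool) : Decidable (Spec_detect_consecutive_threshold records metric_name threshold consecutive_days out) := by unfold Spec_detect_consecutive_threshold; infer_instance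

-- ===== CLAIM (what is proved, stated in full; the proofs are below) =====
def Claim_equal_detect_consecutive_threshold : Prop := ∀ (records : List (List (String × Int))) (metric_name : String) (threshold : Int) (consecutive_days : Int), Dom_detect_consecutive_threshold records metric_name threshold consecutive_days → Spec_detect_consecutive_threshold records metric_name threshold consecutive_days (detect_consecutive_threshold records metric_name threshold consecutive_days)

-- ===== LEMMAS AND PROOFS =====

lemma pvInfix_cons {α : Type} {l₁ l₂ : List α} (a : α) (h : l₁ <:+: l₂) : l₁ <:+: a :: l₂ := by
  obtain ⟨s, t, hst⟩ := h
  exact ⟨a :: s, t, by rw [← hst]; simp⟩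

lemma pvReplicate_prefix {k W : Nat} (hWk : W ≤ k) :
    List.replicate W true <+: List.replicate k true := by
  have h : (List.replicate k true).take W = List.replicate W true := by
    rw [List.take_replicate]; congr 1; omega
  exact h ▸ List.take_prefix _ _

-- A's loop over records equals the same loop over the precomputed boolean list
def pvScanBool (cd : Int) : List Bool → Int → Bool
  | [], _ => false
  | b :: bs, c =>
      if b then (if c + 1 ≥ cd then true else pvScanBool cd bs (c + 1))
      else pvScanBool cd bs 0

lemma scanA_eq_scanBool (m : String) (t cd : Int) :
    ∀ (rs : List (List (String × Int))) (c : Int),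
      pvScanA m t cd rs c
        = pvScanBool cd (rs.map (fun record => decide ((PySem.Dict.mk record).getD m 0 ≥ t))) c := by
  intro rs
  induction rs with
  | nil => intro c; rfl
  | cons r rest ih =>
      intro c
      simp only [pvScanA, pvScanBool, List.map_cons, decide_eq_true_eq]
      split_ifs <;> simp [ih]

-- characterisation of the counter loop with carry c ≥ 0:
-- it hits `true` iff an initial all-true prefix finishes the carried run,
-- or some window of max(cd,1) consecutive trues occurs in the list
lemma scanBool_iff (cd : Int) (bs : List Bool) :
    ∀ c : Int, 0 ≤ c →
      (pvScanBool cd bs c = true ↔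
        ((∃ k : Nat, 1 ≤ k ∧ k ≤ bs.length ∧ bs.take k = List.replicate k true ∧ cd ≤ c + k)
          ∨ List.replicate (max cd 1).toNat true <:+: bs)) := by
  induction bs with
  | nil =>
      intro c _
      constructor
      · intro h; simp [pvScanBool] at h
      · rintro (⟨k, hk1, hk0, _⟩ | h)
        · simp at hk0; omega
        · exfalso
          rw [List.infix_nil] at h
          have hW0 : (max cd 1).toNat = 0 := by
            simpa using congrArg List.length h
          omega
  | cons b bs ih =>
      intro c hc
      have hW1 : 1 ≤ (max cd 1).toNat := by omega
      have hWcd : cd ≤ ((max cd 1).toNat : Int) := by omega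
      cases b with
      | true =>
          by_cases hcd : c + 1 ≥ cd
          · have hL : pvScanBool cd (true :: bs) c = true := by simp [pvScanBool, hcd]
            rw [hL]
            simp only [true_iff]
            exact Or.inl ⟨1, le_refl 1, by simp, by simp, by push_cast; omega⟩
          · have hstep : pvScanBool cd (true :: bs) c = pvScanBool cd bs (c + 1) := by
              simp [pvScanBool, hcd]
            rw [hstep, ih (c + 1) (by omega)]
            constructor
            · rintro (⟨k, hk1, hkl, htk, hcdk⟩ | hinf)
              · refine Or.inl ⟨k + 1, by omega, by simp; omega, ?_, by push_cast at hcdk ⊢; omega⟩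
                rw [List.take_succ_cons, htk, List.replicate_succ]
              · exact Or.inr (pvInfix_cons true hinf)
            · rintro (⟨k, hk1, hkl, htk, hcdk⟩ | hinf)
              · obtain ⟨k', rfl⟩ : ∃ k', k = k' + 1 := ⟨k - 1, by omega⟩
                have hk'1 : 1 ≤ k' := by
                  by_contra hcon
                  have hk0 : k' = 0 := by omega
                  subst hk0
                  push_cast at hcdk; omega
                rw [List.take_succ_cons, List.replicate_succ] at htk
                have htk' : bs.take k' = List.replicate k' true := by simpa using htk
                refine Or.inl ⟨k', hk'1, by simp at hkl; omega, htk', by push_cast at hcdk ⊢; omega⟩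
              · rcases List.infix_cons_iff.mp hinf with hpre | hinf'
                · -- the window is a prefix of true :: bs; here cd ≥ c + 2, so the window has ≥ 2 trues
                  have hW2 : 2 ≤ (max cd 1).toNat := by omega
                  obtain ⟨W', hW'⟩ : ∃ W', (max cd 1).toNat = W' + 1 :=
                    ⟨(max cd 1).toNat - 1, by omega⟩
                  rw [hW', List.replicate_succ] at hpre
                  obtain ⟨t, ht⟩ := hpre
                  have hbs : bs = List.replicate W' true ++ t := by
                    have := congrArg List.tail ht
                    simpa using this.symm
                  refine Or.inl ⟨W', by omega, by simp [hbs], ?_, by omega⟩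
                  rw [hbs, List.take_append_of_le_length (by simp), List.take_replicate]
                  congr 1; omega
                · exact Or.inr hinf'
      | false =>
          have hstep : pvScanBool cd (false :: bs) c = pvScanBool cd bs 0 := by
            simp [pvScanBool]
          rw [hstep, ih 0 le_rfl]
          constructor
          · rintro (⟨k, hk1, hkl, htk, hcdk⟩ | hinf)
            · -- an initial run of k ≥ max(cd,1) trues in bs is itself a window
              have hWk : (max cd 1).toNat ≤ k := by omega
              have hpre : List.replicate k true <+: bs := htk ▸ List.take_prefix k bs
              exact Or.inr (pvInfix_cons false ((pvReplicate_prefix hWk).trans hpre).isInfix)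
            · exact Or.inr (pvInfix_cons false hinf)
          · rintro (⟨k, hk1, hkl, htk, _⟩ | hinf)
            · exfalso
              obtain ⟨k', rfl⟩ : ∃ k', k = k' + 1 := ⟨k - 1, by omega⟩
              rw [List.take_succ_cons, List.replicate_succ] at htk
              simp at htk
            · rcases List.infix_cons_iff.mp hinf with hpre | hinf'
              · exfalso
                obtain ⟨W', hW'⟩ : ∃ W', (max cd 1).toNat = W' + 1 :=
                  ⟨(max cd 1).toNat - 1, by omega⟩
                rw [hW', List.replicate_succ] at hpre
                obtain ⟨t, ht⟩ := hpre
                simpa using congrArg List.head? ht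
              · exact Or.inr hinf'

lemma scanBool_zero_iff (cd : Int) (bs : List Bool) :
    pvScanBool cd bs 0 = true ↔ List.replicate (max cd 1).toNat true <:+: bs := by
  rw [scanBool_iff cd bs 0 le_rfl]
  constructor
  · rintro (⟨k, hk1, hkl, htk, hcdk⟩ | hinf)
    · have hWk : (max cd 1).toNat ≤ k := by omega
      have hpre : List.replicate k true <+: bs := htk ▸ List.take_prefix k bs
      exact ((pvReplicate_prefix hWk).trans hpre).isInfix
    · exact hinf
  · exact Or.inr

-- B's any/all over windows finds exactly a replicate-window infix
lemma any_window_iff (bs : List Bool) (window : Int) (hw : 1 ≤ window) :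
    ((PySem.List.pyRange 0 ((bs.length : Int) - window + 1) 1).any
      (fun i => (PySem.List.slice bs (some i) (some (i + window))).all (fun b => b)) = true)
      ↔ List.replicate window.toNat true <:+: bs := by
  rw [List.any_eq_true]
  constructor
  · rintro ⟨i, hmem, hall⟩
    rw [PySem.List.mem_pyRange_one] at hmem
    obtain ⟨hi0, hilt⟩ := hmem
    rw [PySem.List.slice_toNat bs hi0 (by omega)] at hall
    have htn : (i + window).toNat - i.toNat = window.toNat := by omega
    rw [htn] at hall
    have hrep : (bs.drop i.toNat).take window.toNat = List.replicate window.toNat true := by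
      apply List.eq_replicate_iff.mpr
      constructor
      · simp; omega
      · intro x hx
        simpa using List.all_eq_true.mp hall x hx
    exact (hrep ▸ (List.take_prefix _ _).isInfix).trans (List.drop_suffix _ _).isInfix
  · rintro ⟨s, t, hst⟩
    refine ⟨(s.length : Int), ?_, ?_⟩
    · rw [PySem.List.mem_pyRange_one]
      refine ⟨Int.natCast_nonneg _, ?_⟩
      have : bs.length = s.length + window.toNat + t.length := by
        rw [← hst]; simp; omega
      omega
    · rw [PySem.List.slice_toNat bs (Int.natCast_nonneg _) (by omega)]
      have htn : ((s.length : Int) + window).toNat - ((s.length : Int)).toNat = window.toNat := by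
        omega
      rw [htn, Int.toNat_natCast, ← hst, List.append_assoc, List.drop_left,
        List.take_append_of_le_length (by simp), List.take_replicate]
      simp

-- ===== VERDICT (by name: the statement is the Claim_ definition above) =====
theorem detect_consecutive_threshold_spec : Claim_equal_detect_consecutive_threshold := by
  intro records metric_name threshold consecutive_days _
  unfold Spec_detect_consecutive_threshold
  unfold detect_consecutive_threshold detect_consecutive_threshold_alt
  by_cases hg : records = [] ∨ (records.length : Int) < consecutive_days
  · rw [if_pos hg, if_pos hg]
  · rw [if_neg hg, if_neg hg]
    show pvScanA metric_name threshold consecutive_days records 0 =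
      (PySem.List.pyRange 0
          (((records.map (fun record => decide ((PySem.Dict.mk record).getD metric_name 0 ≥ threshold))).length : Int)
            - (max consecutive_days 1) + 1) 1).any
        (fun i => (PySem.List.slice
            (records.map (fun record => decide ((PySem.Dict.mk record).getD metric_name 0 ≥ threshold)))
            (some i) (some (i + (max consecutive_days 1)))).all (fun b => b))
    rw [scanA_eq_scanBool, Bool.eq_iff_iff, scanBool_zero_iff,
      any_window_iff _ _ (le_max_right _ _)]
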